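-- pv_equiv track=rewrite | github.com/wmboyles/Python-Fun | Programming Puzzles/DailyProgrammer/dailyprogrammer_344_easy.py | oddZeroRuns
-- ===== SOURCE A (Python) =====
-- def oddZeroRuns(s):
--     oddRuns = 0
--     runLen = 0
--     for char in s:
--         if char == "0": runLen += 1
--         else:
--             if(runLen > 0 and runLen % 2 == 1):
--                 oddRuns += 1
--                 runLen = 0
--
--     if(runLen > 0 and runLen % 2 == 1): oddRuns += 1
--
--     return oddRuns
-- ===== SOURCE B (Python) =====
-- def oddZeroRuns(s):
--     count = 0
--     i = 0
--     n = len(s)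
--     while i < n:
--         if s[i] == "0":
--             j = i
--             while j < n and s[j] == "0":
--                 j += 1
--             if (j - i) % 2 == 1:
--                 count += 1
--             i = j
--         else:
--             i += 1
--     return count
-- ===== Notes on version B (the rewrite author's own statement) =====
-- stated objective: alternative
-- what changed: B is a two-pointer index scan that measures each maximal zero-run independently and tests its own length's parity, instead of A's per-character loop carrying a run-length accumulator that is only reset on odd parity; they agree because A's accumulator is always even when a run starts.
import Mathlib
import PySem

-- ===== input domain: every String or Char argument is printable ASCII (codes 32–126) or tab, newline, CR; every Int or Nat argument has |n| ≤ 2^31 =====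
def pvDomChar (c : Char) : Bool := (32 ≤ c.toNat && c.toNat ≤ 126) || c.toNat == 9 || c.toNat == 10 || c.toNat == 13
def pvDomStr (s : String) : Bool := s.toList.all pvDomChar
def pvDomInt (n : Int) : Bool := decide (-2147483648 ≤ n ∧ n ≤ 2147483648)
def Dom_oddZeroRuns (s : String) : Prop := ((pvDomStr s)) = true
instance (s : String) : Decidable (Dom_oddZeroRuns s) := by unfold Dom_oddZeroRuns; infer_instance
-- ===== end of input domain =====

-- B measures each maximal zero-run independently with a two-pointer scan; same cost as A, no carried accumulator state.

-- ===== PORT A =====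
-- per-character step of A's loop on state (oddRuns, runLen)
def oddZeroRunsStepA (st : Int × Int) (c : Char) : Int × Int :=
  if c = '0' then (st.1, st.2 + 1)
  else if st.2 > 0 ∧ st.2 % 2 = 1 then (st.1 + 1, 0) else (st.1, st.2)

def oddZeroRuns (s : String) : Int :=
  let st := s.toList.foldl oddZeroRunsStepA (0, 0)
  if st.2 > 0 ∧ st.2 % 2 = 1 then st.1 + 1 else st.1

-- ===== PORT B =====
-- B's outer while loop: at a '0' the inner loop advances j over the run
-- (takeWhile measures it, dropWhile resumes after it); otherwise advance one char.
def oddZeroRunsScanB : List Char → Int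
  | [] => 0
  | c :: rest =>
    if c = '0' then
      (if ((1 : Int) + (rest.takeWhile (· == '0')).length) % 2 = 1 then 1 else 0)
        + oddZeroRunsScanB (rest.dropWhile (· == '0'))
    else oddZeroRunsScanB rest
termination_by l => l.length
decreasing_by
  · simp only [List.length_cons]
    exact Nat.lt_succ_of_le (List.length_dropWhile_le _ _)
  · simp

def oddZeroRuns_alt (s : String) : Int := oddZeroRunsScanB s.toList

-- ===== PRECONDITION & SPEC =====
def Spec_oddZeroRuns (s : String) (out : Int) : Prop := out = oddZeroRuns_alt s
instance (s : String) (out : Int) : Decidable (Spec_oddZeroRuns s out) := by unfold Spec_oddZeroRuns; infer_instance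

-- ===== CLAIM (what is proved, stated in full; the proofs are below) =====
def Claim_equal_oddZeroRuns : Prop := ∀ (s : String), Dom_oddZeroRuns s → Spec_oddZeroRuns s (oddZeroRuns s)

-- ===== LEMMAS AND PROOFS =====

-- A's final answer from state (o, r)
def finishA (l : List Char) (o r : Int) : Int :=
  let st := l.foldl oddZeroRunsStepA (o, r)
  if st.2 > 0 ∧ st.2 % 2 = 1 then st.1 + 1 else st.1

-- A's step over a run of '0's adds the run length to runLen
theorem foldA_zeros (l : List Char) (h : ∀ c ∈ l, c = '0') (o r : Int) :
    l.foldl oddZeroRunsStepA (o, r) = (o, r + l.length) := by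
  induction l generalizing r with
  | nil => simp
  | cons c t ih =>
    have hc := h c (by simp)
    simp only [List.foldl_cons, oddZeroRunsStepA, hc, if_true]
    rw [ih (fun x hx => h x (by simp [hx]))]
    simp; ring

theorem takeWhile_all_eq (c : Char) (l : List Char) : ∀ x ∈ l.takeWhile (· == c), x = c := by
  intro x hx
  have := List.mem_takeWhile_imp hx
  simpa using this

theorem dropWhile_head_ne (l : List Char) (c' : Char) (d' : List Char)
    (h : l.dropWhile (· == '0') = c' :: d') : c' ≠ '0' := by
  induction l with
  | nil => simp [List.dropWhile] at h
  | cons x t ih =>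
    by_cases hx : x = '0'
    · rw [List.dropWhile_cons_of_pos (by simp [hx])] at h
      exact ih h
    · rw [List.dropWhile_cons_of_neg (by simp [hx])] at h
      intro hc; apply hx; rw [← List.cons.injEq x t c' d' |>.mp h |>.1] at hc; exact hc

-- main invariant: with an even, nonnegative carried runLen, A's remaining
-- computation equals o plus B's independent per-run count
theorem finishA_eq (l : List Char) (o r : Int) (hr : 0 ≤ r) (he : r % 2 = 0) :
    finishA l o r = o + oddZeroRunsScanB l := by
  induction l using oddZeroRunsScanB.induct generalizing o r with
  | case1 => simp [finishA, oddZeroRunsScanB]; omega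
  | case2 rest ih =>
    set t := rest.takeWhile (· == '0') with ht
    set d := rest.dropWhile (· == '0') with hd
    have hk : (1 : Int) + t.length ≥ 1 := by omega
    have hsplit : ('0' : Char) :: rest = ('0' :: t) ++ d := by
      simp [ht, hd, List.takeWhile_append_dropWhile]
    have hz : ∀ x ∈ ('0' : Char) :: t, x = '0' := by
      intro x hx
      rcases List.mem_cons.mp hx with h | h
      · exact h
      · exact takeWhile_all_eq _ _ x h
    have hfold : (('0' : Char) :: rest).foldl oddZeroRunsStepA (o, r)
        = d.foldl oddZeroRunsStepA (o, r + (1 + t.length)) := by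
      rw [hsplit, List.foldl_append, foldA_zeros _ hz]
      congr 1; simp; ring
    have hBr : oddZeroRunsScanB ('0' :: rest)
        = (if ((1 : Int) + t.length) % 2 = 1 then 1 else 0) + oddZeroRunsScanB d := by
      rw [oddZeroRunsScanB]; simp [ht, hd]
    by_cases hodd : (r + (1 + (t.length : Int))) % 2 = 1
    · -- current run is odd
      have hkodd : ((1 : Int) + t.length) % 2 = 1 := by omega
      match hdd : d with
      | [] =>
        simp only [finishA, hfold, List.foldl_nil]
        have : r + (1 + (t.length : Int)) > 0 := by omega
        simp [this, hodd, hBr, oddZeroRunsScanB, hkodd]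
      | c' :: d' =>
        have hc' : c' ≠ '0' := dropWhile_head_ne rest c' d' hd.symm
        have hstep : oddZeroRunsStepA (o, r + (1 + t.length)) c' = (o + 1, 0) := by
          simp only [oddZeroRunsStepA, if_neg hc']
          rw [if_pos ⟨by omega, by omega⟩]
        have hstep2 : oddZeroRunsStepA (o + 1, 0) c' = (o + 1, 0) := by
          simp [oddZeroRunsStepA, hc']
        have : finishA ('0' :: rest) o r = finishA (c' :: d') (o + 1) 0 := by
          simp only [finishA, hfold, List.foldl_cons, hstep, hstep2]
        rw [this, ih (o + 1) 0 le_rfl (by norm_num)]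
        rw [hBr]
        simp [hkodd]; ring
    · -- current run is even
      have hkeven : ¬(((1 : Int) + t.length) % 2 = 1) := by omega
      have := ih o (r + (1 + t.length)) (by omega) (by omega)
      have hfin : finishA ('0' :: rest) o r = finishA d o (r + (1 + t.length)) := by
        simp only [finishA, hfold]
      rw [hfin, this, hBr]
      simp [hkeven]
  | case3 c rest hc ih =>
    have hstep : oddZeroRunsStepA (o, r) c = (o, r) := by
      simp [oddZeroRunsStepA, hc]
      intro h; omega
    have : finishA (c :: rest) o r = finishA rest o r := by
      simp only [finishA, List.foldl_cons, hstep]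
    rw [this, ih o r hr he, oddZeroRunsScanB]
    simp [hc]

-- ===== VERDICT (by name: the statement is the Claim_ definition above) =====
theorem oddZeroRuns_spec : Claim_equal_oddZeroRuns := by
  intro s _
  unfold Spec_oddZeroRuns oddZeroRuns oddZeroRuns_alt
  exact (by simpa [finishA] using finishA_eq s.toList 0 0 le_rfl rfl)
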